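-- pv_equiv track=rewrite | github.com/cirosantilli/project-euler-solutions | solvers/513.py | build_squarefree_divisor_lists
-- ===== SOURCE A (Python) =====
-- def build_squarefree_divisor_lists(n: int, mu):
--     """
--     For every A <= n, build:
--       - all squarefree divisors d of A (i.e. mu[d] != 0) with their mu[d]
--       - odd squarefree divisors similarly
--     using a divisor-sieve style construction.
--     """
--     all_divs = [[] for _ in range(n + 1)]
--     odd_divs = [[] for _ in range(n + 1)]
--
--     for d in range(1, n + 1):
--         md = mu[d]
--         if md == 0:
--             continue
--         if d & 1:
--             for m in range(d, n + 1, d):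
--                 all_divs[m].append((d, md))
--                 odd_divs[m].append((d, md))
--         else:
--             for m in range(d, n + 1, d):
--                 all_divs[m].append((d, md))
--
--     return all_divs, odd_divs
-- ===== SOURCE B (Python) =====
-- def build_squarefree_divisor_lists(n: int, mu):
--     # Direct per-number construction: for each m, enumerate its divisors by
--     # trial division in increasing order, instead of a sieve over multiples.
--     all_divs, odd_divs = [], []
--     for m in range(n + 1):
--         a = [(d, mu[d]) for d in range(1, m + 1) if m % d == 0 and mu[d] != 0]
--         all_divs.append(a)
--         odd_divs.append([(d, md) for (d, md) in a if d & 1])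
--     return all_divs, odd_divs
-- ===== Notes on version B (the rewrite author's own statement) =====
-- stated objective: alternative
-- what changed: B replaces A's divisor sieve (looping over d and appending to every multiple) with a direct per-number construction: for each m it enumerates m's divisors by trial division in increasing order, so the two output lists are built row by row with no shared mutable arrays; it trades the sieve's O(n log n) for O(n^2) trial division.
import Mathlib
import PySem

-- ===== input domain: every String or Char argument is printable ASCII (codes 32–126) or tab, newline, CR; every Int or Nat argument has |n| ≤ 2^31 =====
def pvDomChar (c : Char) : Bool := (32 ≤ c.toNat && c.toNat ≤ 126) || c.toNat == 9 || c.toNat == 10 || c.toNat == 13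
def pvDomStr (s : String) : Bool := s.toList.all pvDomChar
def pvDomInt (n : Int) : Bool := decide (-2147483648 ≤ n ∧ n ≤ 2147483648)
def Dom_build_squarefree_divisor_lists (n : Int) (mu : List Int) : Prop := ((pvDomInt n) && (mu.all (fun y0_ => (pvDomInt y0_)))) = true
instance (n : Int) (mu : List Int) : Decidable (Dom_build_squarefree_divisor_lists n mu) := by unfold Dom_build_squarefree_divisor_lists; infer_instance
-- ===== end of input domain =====

-- B replaces A's divisor sieve with direct per-number trial division (different algorithm,
-- same exact output; objective: alternative, not faster).


-- ===== PORT A =====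
-- lst[m].append(v): m is always ≥ 1 here (m ranges over positive multiples), so .toNat is exact
def pvAppendAt (xs : List (List (Int × Int))) (m : Int) (v : Int × Int) : List (List (Int × Int)) :=
  xs.modify m.toNat (fun l => l ++ [v])

def build_squarefree_divisor_lists (n : Int) (mu : List Int) : (List (List (Int × Int))) × (List (List (Int × Int))) :=
  (PySem.List.pyRange 1 (n + 1) 1).foldl
    (fun (st : List (List (Int × Int)) × List (List (Int × Int))) d =>
      -- md = mu[d]: d ≥ 1 and, under Pre_, d < len(mu); the getD default is never taken on Pre_
      let md := (PySem.List.pyGet? mu d).getD 0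
      if md = 0 then st
      else if PySem.Int.mod d 2 == 1 then  -- 'if d & 1' (Python n & 1 = n % 2 for every int)
        (PySem.List.pyRange d (n + 1) d).foldl
          (fun st2 m => (pvAppendAt st2.1 m (d, md), pvAppendAt st2.2 m (d, md))) st
      else
        ((PySem.List.pyRange d (n + 1) d).foldl (fun l m => pvAppendAt l m (d, md)) st.1, st.2))
    (List.replicate (n + 1).toNat [], List.replicate (n + 1).toNat [])

-- ===== PORT B =====
def build_squarefree_divisor_lists_alt (n : Int) (mu : List Int) : (List (List (Int × Int))) × (List (List (Int × Int))) :=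
  (PySem.List.pyRange 0 (n + 1) 1).foldl
    (fun (st : List (List (Int × Int)) × List (List (Int × Int))) m =>
      -- a = [(d, mu[d]) for d in range(1, m+1) if m % d == 0 and mu[d] != 0]
      let a := ((PySem.List.pyRange 1 (m + 1) 1).filter
          (fun d => PySem.Int.mod m d == 0 && !((PySem.List.pyGet? mu d).getD 0 == 0))).map
        (fun d => (d, (PySem.List.pyGet? mu d).getD 0))
      (st.1 ++ [a], st.2 ++ [a.filter (fun p => PySem.Int.mod p.1 2 == 1)]))
    ([], [])

-- ===== PRECONDITION & SPEC =====
-- Pre_: exactly the inputs where A returns: either the loop is empty (n ≤ 0) or mu[1..n] all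
-- exist; otherwise mu[d] raises IndexError.
def Pre_build_squarefree_divisor_lists (n : Int) (mu : List Int) : Prop :=
  n ≤ 0 ∨ n < (mu.length : Int)
instance (n : Int) (mu : List Int) : Decidable (Pre_build_squarefree_divisor_lists n mu) := by
  unfold Pre_build_squarefree_divisor_lists; infer_instance

def pvWitness_build_squarefree_divisor_lists : Int × List Int := (2, [0, 1, -1])

def Spec_build_squarefree_divisor_lists (n : Int) (mu : List Int) (out : (List (List (Int × Int))) × (List (List (Int × Int)))) : Prop := out = build_squarefree_divisor_lists_alt n mu
instance (n : Int) (mu : List Int) (out : (List (List (Int × Int))) × (List (List (Int × Int)))) : Decidable (Spec_build_squarefree_divisor_lists n mu out) := by unfold Spec_build_squarefree_divisor_lists; infer_instance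

-- ===== CLAIM (what is proved, stated in full; the proofs are below) =====
def Claim_equal_build_squarefree_divisor_lists : Prop := ∀ (n : Int) (mu : List Int), Dom_build_squarefree_divisor_lists n mu → Pre_build_squarefree_divisor_lists n mu → Spec_build_squarefree_divisor_lists n mu (build_squarefree_divisor_lists n mu)

-- ===== LEMMAS AND PROOFS =====

-- mu[d] with the unused default (under Pre_, d is in range wherever md ≠ 0 matters)
def pvMd (mu : List Int) (d : Int) : Int := (PySem.List.pyGet? mu d).getD 0
-- the (d, mu[d]) pair both programs append
def pvFF (mu : List Int) (d : Int) : Int × Int := (d, pvMd mu d)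
-- B's row for m: divisors of m in increasing order with their nonzero mu values
def divList (mu : List Int) (m : Int) : List (Int × Int) :=
  ((PySem.List.pyRange 1 (m + 1) 1).filter
      (fun d => PySem.Int.mod m d == 0 && !((PySem.List.pyGet? mu d).getD 0 == 0))).map
    (fun d => (d, (PySem.List.pyGet? mu d).getD 0))
-- does A's sieve pass for divisor d touch index k?
def pvHit (n d : Int) (k : Nat) : Bool := decide ((k : Int) ∈ PySem.List.pyRange d (n + 1) d)
-- A's filter predicates over the outer loop's divisor list, read at index k
def pA (n : Int) (mu : List Int) (k : Nat) (d : Int) : Bool := !(pvMd mu d == 0) && pvHit n d k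
def pO (n : Int) (mu : List Int) (k : Nat) (d : Int) : Bool := pA n mu k d && (PySem.Int.mod d 2 == 1)

-- B's fold just maps divList over the m-range
lemma alt_eq (n : Int) (mu : List Int) :
    build_squarefree_divisor_lists_alt n mu =
      ((PySem.List.pyRange 0 (n + 1) 1).map (divList mu),
       (PySem.List.pyRange 0 (n + 1) 1).map
         (fun m => (divList mu m).filter (fun p => PySem.Int.mod p.1 2 == 1))) := by
  have gen : ∀ (L : List Int) (x y : List (List (Int × Int))),
      L.foldl (fun st m => (st.1 ++ [divList mu m],
          st.2 ++ [(divList mu m).filter (fun p => PySem.Int.mod p.1 2 == 1)])) (x, y)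
        = (x ++ L.map (divList mu),
           y ++ L.map fun m => (divList mu m).filter (fun p => PySem.Int.mod p.1 2 == 1)) := by
    intro L
    induction L with
    | nil => intro x y; simp
    | cons m L ih => intro x y; rw [List.foldl_cons, ih]; simp
  simpa [build_squarefree_divisor_lists_alt, divList] using gen (PySem.List.pyRange 0 (n + 1) 1) [] []

-- the sieve's inner fold, read at index k: v is appended once per occurrence of k in ms
lemma inner_get (v : Int × Int) (ms : List Int) (hms : ∀ m ∈ ms, 1 ≤ m) :
    ∀ (arr : List (List (Int × Int))) (k : Nat),
      (ms.foldl (fun l m => pvAppendAt l m v) arr)[k]? =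
        (arr[k]?).map (· ++ List.replicate (ms.count (k : Int)) v) := by
  induction ms with
  | nil => intro arr k; cases h : arr[k]? <;> simp [h]
  | cons m ms ih =>
    intro arr k
    simp only [List.foldl_cons]
    rw [ih (fun x hx => hms x (List.mem_cons_of_mem _ hx))]
    have hm : 1 ≤ m := hms m List.mem_cons_self
    rw [pvAppendAt, List.getElem?_modify]
    by_cases he : m.toNat = k
    · have : m = (k : Int) := by omega
      subst this
      cases h : arr[k]? <;> simp [h, he, List.replicate_succ]
    · have hne : ¬ (m == (k : Int)) = true := by
        simp only [beq_iff_eq]; omega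
      cases h : arr[k]? <;> simp [h, he, hne, List.count_cons]

-- A's paired inner fold splits componentwise
lemma inner_pair (ms : List Int) (v : Int × Int) :
    ∀ (st : List (List (Int × Int)) × List (List (Int × Int))),
    ms.foldl (fun st2 m => (pvAppendAt st2.1 m v, pvAppendAt st2.2 m v)) st
      = (ms.foldl (fun l m => pvAppendAt l m v) st.1,
         ms.foldl (fun l m => pvAppendAt l m v) st.2) := by
  induction ms with
  | nil => intro st; rfl
  | cons m ms ih => intro st; simp only [List.foldl_cons]; rw [ih]

-- the multiples list has no duplicates, so its count at k is the pvHit indicator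
lemma count_multiples (n d : Int) (hd : 1 ≤ d) (k : Nat) :
    (PySem.List.pyRange d (n + 1) d).count (k : Int) = if pvHit n d k then 1 else 0 := by
  have hnd : (PySem.List.pyRange d (n + 1) d).Nodup := by
    rw [PySem.List.pyRange_of_pos d (n + 1) (by omega : (0:Int) < d)]
    refine List.Nodup.map ?_ List.nodup_range
    intro a b hab
    have h2 : d * (a:Int) = d * (b:Int) := by
      have h3 : d + d * (a:Int) = d + d * (b:Int) := by simpa using hab
      omega
    have := mul_left_cancel₀ (show d ≠ 0 by omega) h2
    exact_mod_cast this
  by_cases hm : (k : Int) ∈ PySem.List.pyRange d (n + 1) d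
  · have h1 : (PySem.List.pyRange d (n + 1) d).count (k : Int) ≤ 1 :=
      List.nodup_iff_count_le_one.mp hnd _
    have h2 : 0 < (PySem.List.pyRange d (n + 1) d).count (k : Int) :=
      List.count_pos_iff.mpr hm
    simp [pvHit, hm]; omega
  · simp [pvHit, hm, List.count_eq_zero.mpr hm]

-- main invariant of A's outer loop, read at index k
lemma outer_get (n : Int) (mu : List Int) :
    ∀ (ds : List Int), (∀ d ∈ ds, 1 ≤ d) →
    ∀ (st : List (List (Int × Int)) × List (List (Int × Int))) (k : Nat),
      (ds.foldl
        (fun (st : List (List (Int × Int)) × List (List (Int × Int))) d =>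
          let md := (PySem.List.pyGet? mu d).getD 0
          if md = 0 then st
          else if PySem.Int.mod d 2 == 1 then
            (PySem.List.pyRange d (n + 1) d).foldl
              (fun st2 m => (pvAppendAt st2.1 m (d, md), pvAppendAt st2.2 m (d, md))) st
          else
            ((PySem.List.pyRange d (n + 1) d).foldl (fun l m => pvAppendAt l m (d, md)) st.1, st.2))
        st).1[k]? = (st.1[k]?).map (· ++ (ds.filter (pA n mu k)).map (pvFF mu)) ∧
      (ds.foldl
        (fun (st : List (List (Int × Int)) × List (List (Int × Int))) d =>
          let md := (PySem.List.pyGet? mu d).getD 0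
          if md = 0 then st
          else if PySem.Int.mod d 2 == 1 then
            (PySem.List.pyRange d (n + 1) d).foldl
              (fun st2 m => (pvAppendAt st2.1 m (d, md), pvAppendAt st2.2 m (d, md))) st
          else
            ((PySem.List.pyRange d (n + 1) d).foldl (fun l m => pvAppendAt l m (d, md)) st.1, st.2))
        st).2[k]? = (st.2[k]?).map (· ++ (ds.filter (pO n mu k)).map (pvFF mu)) := by
  intro ds
  induction ds with
  | nil =>
    intro _ st k
    constructor
    · cases h : st.1[k]? <;> simp [h]
    · cases h : st.2[k]? <;> simp [h]
  | cons d ds ih =>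
    intro hds st k
    have hd : 1 ≤ d := hds d List.mem_cons_self
    have hds' : ∀ x ∈ ds, 1 ≤ x := fun x hx => hds x (List.mem_cons_of_mem _ hx)
    have hmspos : ∀ m ∈ PySem.List.pyRange d (n + 1) d, 1 ≤ m := by
      intro m hm
      have := (PySem.List.mem_pyRange_iff_of_pos (show (0:Int) < d by omega) m).mp hm
      omega
    simp only [List.foldl_cons]
    by_cases h0 : (PySem.List.pyGet? mu d).getD 0 = 0
    · have hpA : pA n mu k d = false := by simp [pA, pvMd, h0]
      have hpO : pO n mu k d = false := by simp [pO, hpA]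
      simp only [h0, if_true, List.filter_cons, hpA, hpO, if_pos, Bool.false_eq_true, if_false]
      exact ih hds' st k
    · have hbne : (!(pvMd mu d == 0)) = true := by simp [pvMd, h0]
      by_cases hodd : (PySem.Int.mod d 2 == 1) = true
      · -- odd branch
        rw [if_neg h0, if_pos hodd, inner_pair]
        obtain ⟨ih1, ih2⟩ := ih hds'
          ((PySem.List.pyRange d (n + 1) d).foldl
             (fun l m => pvAppendAt l m (d, (PySem.List.pyGet? mu d).getD 0)) st.1,
           (PySem.List.pyRange d (n + 1) d).foldl
             (fun l m => pvAppendAt l m (d, (PySem.List.pyGet? mu d).getD 0)) st.2) k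
        dsimp only at ih1 ih2
        rw [ih1, ih2,
          inner_get _ _ hmspos st.1 k, inner_get _ _ hmspos st.2 k,
          count_multiples n d hd k]
        have hodd' : d % 2 = 1 := by simpa using hodd
        have hpA : pA n mu k d = pvHit n d k := by simp [pA, hbne]
        have hpO : pO n mu k d = pvHit n d k := by simp [pO, pA, hbne, hodd']
        constructor
        · cases h : st.1[k]? <;>
            cases hh : pvHit n d k <;>
              simp [h, hh, List.filter_cons, hpA, pvFF, pvMd]
        · cases h : st.2[k]? <;>
            cases hh : pvHit n d k <;>
              simp [h, hh, List.filter_cons, hpO, pvFF, pvMd]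
      · -- even branch
        rw [if_neg h0, if_neg hodd]
        obtain ⟨ih1, ih2⟩ := ih hds'
          ((PySem.List.pyRange d (n + 1) d).foldl
             (fun l m => pvAppendAt l m (d, (PySem.List.pyGet? mu d).getD 0)) st.1, st.2) k
        dsimp only at ih1 ih2
        rw [ih1, ih2, inner_get _ _ hmspos st.1 k, count_multiples n d hd k]
        have h2d : (2:Int) ∣ d := by
          rcases PySem.Int.mod_two_eq d with h | h
          · exact (PySem.Int.mod_eq_zero_iff_dvd d 2).mp h
          · exact absurd (by rw [h]; rfl) hodd
        have hm0 : d % 2 = 0 := by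
          have := (PySem.Int.mod_eq_zero_iff_dvd d 2).mpr h2d
          simpa using this
        have hpA : pA n mu k d = pvHit n d k := by simp [pA, hbne]
        have hpO : pO n mu k d = false := by simp [pO, pA, hm0]
        constructor
        · cases h : st.1[k]? <;>
            cases hh : pvHit n d k <;>
              simp [h, hh, List.filter_cons, hpA, pvFF, pvMd]
        · cases h : st.2[k]? <;>
            simp [h, List.filter_cons, hpO]

-- A's filtered divisor list at k equals B's trial-division row at k
lemma filter_eq_divList (n : Int) (mu : List Int) (k : Nat) (hk : (k : Int) ≤ n) :
    ((PySem.List.pyRange 1 (n + 1) 1).filter (pA n mu k)).map (pvFF mu) = divList mu (k : Int) := by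
  rw [PySem.List.pyRange_one_append 1 ((k:Int)+1) (n+1) (by omega) (by omega), List.filter_append]
  have h2 : (PySem.List.pyRange ((k:Int)+1) (n+1) 1).filter (pA n mu k) = [] := by
    rw [List.filter_eq_nil_iff]
    intro d hdm
    rw [PySem.List.mem_pyRange_one] at hdm
    have hhit : pvHit n d k = false := by
      simp only [pvHit, decide_eq_false_iff_not,
        PySem.List.mem_pyRange_iff_of_pos (show (0:Int) < d by omega)]
      rintro ⟨hle, _, _⟩; omega
    simp [pA, hhit]
  have h1 : (PySem.List.pyRange 1 ((k:Int)+1) 1).filter (pA n mu k)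
      = (PySem.List.pyRange 1 ((k:Int)+1) 1).filter
          (fun d => PySem.Int.mod (k:Int) d == 0 && !((PySem.List.pyGet? mu d).getD 0 == 0)) := by
    apply List.filter_congr
    intro d hdm
    rw [PySem.List.mem_pyRange_one] at hdm
    have hdpos : (0:Int) < d := by omega
    have hdvd_iff : (d ∣ (k:Int) - d) ↔ d ∣ (k:Int) := by
      constructor
      · intro h; simpa using dvd_add h (dvd_refl d)
      · intro h; exact dvd_sub h (dvd_refl d)
    by_cases hdd : d ∣ (k:Int)
    · simp [pA, pvHit, pvMd, PySem.List.mem_pyRange_iff_of_pos hdpos,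
        (PySem.Int.mod_eq_zero_iff_dvd _ _).mpr hdd, hdvd_iff, hdd, Bool.and_comm]
      omega
    · have hm0 : ¬ PySem.Int.mod (k:Int) d = 0 := fun h => hdd ((PySem.Int.mod_eq_zero_iff_dvd _ _).mp h)
      simp [pA, pvHit, pvMd, PySem.List.mem_pyRange_iff_of_pos hdpos, hdvd_iff, hdd, hm0]
  rw [h1, h2, List.append_nil, divList]
  rfl

lemma filter_eq_divList_odd (n : Int) (mu : List Int) (k : Nat) (hk : (k : Int) ≤ n) :
    ((PySem.List.pyRange 1 (n + 1) 1).filter (pO n mu k)).map (pvFF mu) =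
      (divList mu (k : Int)).filter (fun p => PySem.Int.mod p.1 2 == 1) := by
  have hsw : (divList mu (k : Int)).filter (fun p => PySem.Int.mod p.1 2 == 1)
      = (((PySem.List.pyRange 1 (n + 1) 1).filter (pA n mu k)).map (pvFF mu)).filter
          (fun p => PySem.Int.mod p.1 2 == 1) := by
    rw [filter_eq_divList n mu k hk]
  rw [hsw, List.filter_map, List.filter_filter]
  refine congrArg _ ?_
  apply List.filter_congr
  intro d _
  simp [pO, Function.comp, pvFF, Bool.and_comm]

-- ===== VERDICT (by name: the statement is the Claim_ definition above) =====
theorem build_squarefree_divisor_lists_spec : Claim_equal_build_squarefree_divisor_lists := by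
  intro n mu _ _
  unfold Spec_build_squarefree_divisor_lists
  rw [alt_eq]
  unfold build_squarefree_divisor_lists
  have hds : ∀ d ∈ PySem.List.pyRange 1 (n + 1) 1, 1 ≤ d := by
    intro d hd; rw [PySem.List.mem_pyRange_one] at hd; omega
  refine Prod.ext ?_ ?_
  · apply List.ext_getElem?
    intro k
    rw [(outer_get n mu _ hds
      (List.replicate (n + 1).toNat [], List.replicate (n + 1).toNat []) k).1]
    rw [List.getElem?_map, PySem.List.getElem?_pyRange_one]
    by_cases hk : k < (n + 1).toNat
    · have hk' : (k : Int) ≤ n := by omega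
      have hk'' : k < (n + 1 - 0).toNat := by omega
      rw [filter_eq_divList n mu k hk']
      simp [hk, hk'', List.getElem?_replicate]
    · have hk'' : ¬ k < (n + 1 - 0).toNat := by omega
      simp [hk, hk'', List.getElem?_replicate]
  · apply List.ext_getElem?
    intro k
    rw [(outer_get n mu _ hds
      (List.replicate (n + 1).toNat [], List.replicate (n + 1).toNat []) k).2]
    rw [List.getElem?_map, PySem.List.getElem?_pyRange_one]
    by_cases hk : k < (n + 1).toNat
    · have hk' : (k : Int) ≤ n := by omega
      have hk'' : k < (n + 1 - 0).toNat := by omega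
      rw [filter_eq_divList_odd n mu k hk']
      simp [hk, hk'', List.getElem?_replicate]
    · have hk'' : ¬ k < (n + 1 - 0).toNat := by omega
      simp [hk, hk'', List.getElem?_replicate]
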